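-- pv_equiv track=rewrite | github.com/ttzytt/PyAutoGrade | tests/Block 4/tested_code/13/Unit 1/Cards/card_functions.py | catch_cheater
-- ===== SOURCE A (Python) =====
-- def catch_cheater(cards_played, initial_card, num_players, starting_player):
--
--     is_reversed = False
--     is_skipping = False
--     cheater = None
--     order_shift = starting_player - 1
--
--
--
--
--
--
--
--     if initial_card[1] == 'skip':
--         order_shift += 1
--     elif initial_card[1] == 'reverse':
--         is_reversed = True
--
--     previous_card = initial_card
--
--     for i in range(len(cards_played)):
--         if is_skipping:
--
--             if is_reversed:
--                 order_shift -= 1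
--             else:
--                 order_shift += 1
--         current_player = (i+order_shift)%num_players
--
--
--         if not (previous_card[0] == cards_played[i][0] or
--                 previous_card[1] == cards_played[i][1]):
--
--             cheater = current_player + 1
--             return cheater
--
--
--         if cards_played[i][1] == 'skip':
--             is_skipping = True
--         else:
--             is_skipping = False
--
--         if cards_played[i][1] == 'reverse':
--             if is_reversed == False:
--                 is_reversed = True
--             else:
--                 is_reversed = False
--
--
--         if is_reversed:
--             order_shift -= 2
--
--         previous_card = cards_played[i]
--
--     return cheater
-- ===== SOURCE B (Python) =====
-- def catch_cheater(cards_played, initial_card, num_players, starting_player):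
--     # Pass 1: find the first card that matches its predecessor in neither color nor value.
--     bad = None
--     prev = initial_card
--     for i, card in enumerate(cards_played):
--         if prev[0] != card[0] and prev[1] != card[1]:
--             bad = i
--             break
--         prev = card
--     if bad is None:
--         return None
--     # Pass 2: replay only the turn-order bookkeeping up to the offending card.
--     shift = starting_player - 1
--     rev = initial_card[1] == 'reverse'
--     if initial_card[1] == 'skip':
--         shift += 1
--     skipping = False
--     for card in cards_played[:bad]:
--         if skipping:
--             shift += -1 if rev else 1
--         skipping = card[1] == 'skip'
--         if card[1] == 'reverse':
--             rev = not rev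
--         if rev:
--             shift -= 2
--     if skipping:
--         shift += -1 if rev else 1
--     return (bad + shift) % num_players + 1
-- ===== Notes on version B (the rewrite author's own statement) =====
-- stated objective: alternative
-- what changed: B splits A's single stateful loop into two independent passes: a first pass that only scans adjacent card pairs to locate the first invalid card, and a second pass that replays just the turn-order bookkeeping (skip/reverse/order_shift) over the prefix before that card; A interleaves both concerns in one loop with early return.
import Mathlib
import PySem

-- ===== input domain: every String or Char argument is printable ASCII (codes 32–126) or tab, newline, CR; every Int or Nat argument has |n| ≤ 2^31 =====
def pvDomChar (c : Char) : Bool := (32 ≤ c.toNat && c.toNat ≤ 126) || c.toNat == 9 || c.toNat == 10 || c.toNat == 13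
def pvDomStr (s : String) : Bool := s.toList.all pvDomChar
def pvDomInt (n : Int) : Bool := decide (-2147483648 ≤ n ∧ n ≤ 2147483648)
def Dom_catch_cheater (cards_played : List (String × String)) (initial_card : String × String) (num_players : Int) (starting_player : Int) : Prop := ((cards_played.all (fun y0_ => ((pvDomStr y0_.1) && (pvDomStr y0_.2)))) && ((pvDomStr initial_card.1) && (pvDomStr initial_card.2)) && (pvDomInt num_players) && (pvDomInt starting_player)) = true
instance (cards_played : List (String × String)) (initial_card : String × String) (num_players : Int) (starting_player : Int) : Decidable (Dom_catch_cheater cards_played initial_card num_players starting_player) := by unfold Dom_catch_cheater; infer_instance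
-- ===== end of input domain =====

-- B replaces A's single interleaved loop by two passes (find first invalid card, then replay
-- only the order bookkeeping over the prefix); same cost, different decomposition.


-- ===== PORT A =====
-- A's for-loop: state (is_reversed, is_skipping, order_shift, previous_card), index i, early return.
def catchLoopA (cards : List (String × String)) (i : Int) (rev skip : Bool)
    (shift : Int) (prev : String × String) (n : Int) : Option Int :=
  match cards with
  | [] => none
  | c :: rest =>
    let shift := if skip then (if rev then shift - 1 else shift + 1) else shift
    let current := PySem.Int.mod (i + shift) n
    if !(prev.1 == c.1 || prev.2 == c.2) then some (current + 1)
    else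
      let skip' := c.2 == "skip"
      let rev' := if c.2 == "reverse" then !rev else rev
      let shift' := if rev' then shift - 2 else shift
      catchLoopA rest (i + 1) rev' skip' shift' c n

def catch_cheater (cards_played : List (String × String)) (initial_card : String × String) (num_players : Int) (starting_player : Int) : Option Int :=
  -- order_shift = starting_player - 1; then if/elif on initial_card[1]
  if initial_card.2 == "skip" then
    catchLoopA cards_played 0 false false (starting_player - 1 + 1) initial_card num_players
  else if initial_card.2 == "reverse" then
    catchLoopA cards_played 0 true false (starting_player - 1) initial_card num_players
  else
    catchLoopA cards_played 0 false false (starting_player - 1) initial_card num_players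

-- ===== PORT B =====
-- B pass 1: index of the first card matching its predecessor in neither component.
def findBadB (prev : String × String) (cards : List (String × String)) : Option Nat :=
  match cards with
  | [] => none
  | c :: rest =>
    if prev.1 != c.1 && prev.2 != c.2 then some 0
    else (findBadB c rest).map (· + 1)

-- B pass 2: replay only the turn-order bookkeeping; returns (rev, skipping, shift).
def replayB (cards : List (String × String)) (rev skip : Bool) (shift : Int) : Bool × Bool × Int :=
  match cards with
  | [] => (rev, skip, shift)
  | c :: rest =>
    let shift := if skip then (if rev then shift - 1 else shift + 1) else shift
    let skip := c.2 == "skip"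
    let rev := if c.2 == "reverse" then !rev else rev
    let shift := if rev then shift - 2 else shift
    replayB rest rev skip shift

def catch_cheater_alt (cards_played : List (String × String)) (initial_card : String × String) (num_players : Int) (starting_player : Int) : Option Int :=
  match findBadB initial_card cards_played with
  | none => none
  | some bad =>
    let shift0 := starting_player - 1
    let rev0 := initial_card.2 == "reverse"
    let shift0 := if initial_card.2 == "skip" then shift0 + 1 else shift0
    -- cards_played[:bad] with bad ≥ 0 is exactly List.take bad
    let (rev, skip, shift) := replayB (cards_played.take bad) rev0 false shift0
    let shift := if skip then (if rev then shift - 1 else shift + 1) else shift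
    some (PySem.Int.mod ((bad : Int) + shift) num_players + 1)

-- ===== PRECONDITION & SPEC =====
-- Pre_ excludes num_players = 0 with a nonempty card list: there Python A reaches '% num_players'
-- and raises ZeroDivisionError.
def Pre_catch_cheater (cards_played : List (String × String)) (initial_card : String × String) (num_players : Int) (starting_player : Int) : Prop :=
  cards_played = [] ∨ num_players ≠ 0
instance (cards_played : List (String × String)) (initial_card : String × String) (num_players : Int) (starting_player : Int) : Decidable (Pre_catch_cheater cards_played initial_card num_players starting_player) := by unfold Pre_catch_cheater; infer_instance

def pvWitness_catch_cheater : (List (String × String)) × (String × String) × Int × Int :=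
  ([("red", "1"), ("blue", "4")], ("red", "2"), 3, 1)

def Spec_catch_cheater (cards_played : List (String × String)) (initial_card : String × String) (num_players : Int) (starting_player : Int) (out : Option Int) : Prop := out = catch_cheater_alt cards_played initial_card num_players starting_player
instance (cards_played : List (String × String)) (initial_card : String × String) (num_players : Int) (starting_player : Int) (out : Option Int) : Decidable (Spec_catch_cheater cards_played initial_card num_players starting_player out) := by unfold Spec_catch_cheater; infer_instance

-- ===== CLAIM (what is proved, stated in full; the proofs are below) =====
def Claim_equal_catch_cheater : Prop := ∀ (cards_played : List (String × String)) (initial_card : String × String) (num_players : Int) (starting_player : Int), Dom_catch_cheater cards_played initial_card num_players starting_player → Pre_catch_cheater cards_played initial_card num_players starting_player → Spec_catch_cheater cards_played initial_card num_players starting_player (catch_cheater cards_played initial_card num_players starting_player)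

-- ===== LEMMAS AND PROOFS =====

-- A's loop from any state equals B's two-pass formulation from the same state.
theorem loopA_eq_twoPass (cards : List (String × String)) :
    ∀ (i : Int) (rev skip : Bool) (shift : Int) (prev : String × String) (n : Int),
    catchLoopA cards i rev skip shift prev n =
      match findBadB prev cards with
      | none => none
      | some k =>
        let (rev', skip', shift') := replayB (cards.take k) rev skip shift
        let shift'' := if skip' then (if rev' then shift' - 1 else shift' + 1) else shift'
        some (PySem.Int.mod (i + (k : Int) + shift'') n + 1) := by
  induction cards with
  | nil => intro i rev skip shift prev n; simp [catchLoopA, findBadB]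
  | cons c rest ih =>
    intro i rev skip shift prev n
    by_cases hbad : (prev.1 != c.1 && prev.2 != c.2) = true
    · have : (!(prev.1 == c.1 || prev.2 == c.2)) = true := by
        simpa [Bool.not_or] using hbad
      simp [catchLoopA, findBadB, hbad, this, replayB]
    · have hok : (!(prev.1 == c.1 || prev.2 == c.2)) = false := by
        cases h1 : prev.1 == c.1 <;> cases h2 : prev.2 == c.2 <;>
          simp_all [Bool.not_or]
      simp only [catchLoopA, findBadB, hbad, hok, if_false, Bool.false_eq_true]
      rw [ih]
      cases hfb : findBadB c rest with
      | none => simp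
      | some k =>
        simp only [Option.map_some, List.take_succ_cons, replayB]
        have : i + 1 + (k : Int) = i + ((k + 1 : Nat) : Int) := by push_cast; ring
        rw [this]

theorem catch_cheater_spec : Claim_equal_catch_cheater := by
  intro cards init n sp _ _
  unfold Spec_catch_cheater catch_cheater catch_cheater_alt
  by_cases hs : (init.2 == "skip") = true
  · have hr : (init.2 == "reverse") = false := by
      have := eq_of_beq hs; simp [this]
    rw [if_pos hs, loopA_eq_twoPass]
    cases hfb : findBadB init cards <;> simp [hfb, hs, hr]
  · rw [if_neg (by simp_all)]
    by_cases hr : (init.2 == "reverse") = true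
    · rw [if_pos hr, loopA_eq_twoPass]
      cases hfb : findBadB init cards <;> simp [hfb, hs, hr]
    · rw [if_neg (by simp_all), loopA_eq_twoPass]
      cases hfb : findBadB init cards <;> simp [hfb, hs, hr]
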